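-- pv_equiv track=rewrite | github.com/MikkelKatholm/Bachelor_Project_From_Ballots_to_Bytes | Shamir/main.py | lagrange_For_ElGamal
-- ===== SOURCE A (Python) =====
-- def extended_euclid_gcd(a,b):
--     isBothNonNegative = a >= 0 or b >= 0
--     if not isBothNonNegative:
--         raise ValueError("Both numbers must be non-negative")
--
--     if b == 0:
--         return (a,1,0)
--     else:
--         dp, xp, yp = extended_euclid_gcd(b, a % b)
--         d, x, y = dp, yp, xp - (a//b)*yp
--         return d, x, y
--
-- def div_mod(num, den, fieldsize):
--     d, x, _ = extended_euclid_gcd(den, fieldsize)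
--     if d != 1:
--         raise ValueError("Denominator must be coprime to fieldsize")
--     return (num * x)
--
-- def lagrange_For_ElGamal(xPoints, index, threshold, fieldsize):
--     result = 1
--     for i in range(threshold):
--         if i == index:
--             continue
--         temp = div_mod(xPoints[i], xPoints[i] - xPoints[index], fieldsize)
--         result = (result * temp) % fieldsize
--     return result
-- ===== SOURCE B (Python) =====
-- def _inv_mod(a, m):
--     # iterative extended Euclid on (a % m, m); returns s with s*a = 1 (mod m)
--     old_r, r = a % m, m
--     old_s, s = 1, 0
--     while r:
--         q = old_r // r
--         old_r, r = r, old_r - q * r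
--         old_s, s = s, old_s - q * s
--     if old_r != 1:
--         raise ValueError("Denominator must be coprime to fieldsize")
--     return old_s
--
-- def lagrange_For_ElGamal(xPoints, index, threshold, fieldsize):
--     terms = [i for i in range(threshold) if i != index]
--     if not terms:
--         return 1
--     num = 1
--     den = 1
--     for i in terms:
--         num *= xPoints[i]
--         den *= xPoints[i] - xPoints[index]
--     return (num * _inv_mod(den, fieldsize)) % fieldsize
-- ===== Notes on version B (the rewrite author's own statement) =====
-- stated objective: alternative
-- what changed: Instead of computing a modular inverse per Lagrange term and reducing mod fieldsize at every step, B accumulates the numerator and denominator as two integer products over the filtered index list and performs a single iterative extended-Euclid inversion of the denominator at the end, with one final reduction.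
import Mathlib
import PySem

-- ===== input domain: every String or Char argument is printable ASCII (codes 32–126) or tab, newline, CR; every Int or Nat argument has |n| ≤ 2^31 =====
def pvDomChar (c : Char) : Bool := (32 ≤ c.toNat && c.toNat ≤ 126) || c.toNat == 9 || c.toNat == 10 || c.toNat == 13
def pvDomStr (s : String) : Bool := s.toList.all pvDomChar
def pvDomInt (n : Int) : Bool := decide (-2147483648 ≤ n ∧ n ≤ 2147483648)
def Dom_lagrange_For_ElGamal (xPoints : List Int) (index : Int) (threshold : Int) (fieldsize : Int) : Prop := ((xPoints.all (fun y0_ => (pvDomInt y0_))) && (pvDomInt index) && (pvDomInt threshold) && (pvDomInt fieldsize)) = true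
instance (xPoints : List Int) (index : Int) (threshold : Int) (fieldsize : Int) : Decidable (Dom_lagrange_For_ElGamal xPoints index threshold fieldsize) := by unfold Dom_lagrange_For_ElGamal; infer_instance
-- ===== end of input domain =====

-- B replaces A's per-term modular inverse + per-step reduction by two accumulated integer
-- products (numerator, denominator) and ONE iterative extended-Euclid inversion at the end
-- (objective: alternative decomposition; same results on all inputs where A returns).

-- termination helper for both Euclid recursions (cited by the ports' `decreasing_by`)
theorem pvModAbsLt (a b : Int) (hb : b ≠ 0) : (PySem.Int.mod a b).natAbs < b.natAbs := by
  rcases lt_or_gt_of_ne hb with h | h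
  · have := PySem.Int.mod_neg_bounds a h
    omega
  · have h1 := PySem.Int.mod_nonneg a h
    have h2 := PySem.Int.mod_lt a h
    omega

-- ===== PORT A =====
-- extended_euclid_gcd: the Python `raise ValueError` branches return junk values here;
-- Pre_ excludes every input on which Python A reaches a raise.
def pvEgcd (a b : Int) : Int × Int × Int :=
  if ¬ (0 ≤ a ∨ 0 ≤ b) then (0, 0, 0)  -- Python: raise ValueError (excluded by Pre_)
  else if hb : b = 0 then (a, 1, 0)  -- hb used by decreasing_by
  else
    let r := pvEgcd b (PySem.Int.mod a b)
    (r.1, r.2.2, r.2.1 - PySem.Int.floordiv a b * r.2.2)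
termination_by b.natAbs
decreasing_by exact pvModAbsLt a b hb

-- div_mod
def pvDivMod (num den fieldsize : Int) : Int :=
  let r := pvEgcd den fieldsize
  if r.1 ≠ 1 then 0  -- Python: raise ValueError (excluded by Pre_)
  else num * r.2.1

def lagrange_For_ElGamal (xPoints : List Int) (index : Int) (threshold : Int) (fieldsize : Int) : Int :=
  (PySem.List.pyRange 0 threshold 1).foldl
    (fun result i =>
      if i = index then result
      else
        let xi := PySem.List.pyGetD xPoints i 0        -- xPoints[i]  (IndexError excluded by Pre_)
        let xj := PySem.List.pyGetD xPoints index 0    -- xPoints[index]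
        PySem.Int.mod (result * pvDivMod xi (xi - xj) fieldsize) fieldsize) 1

-- ===== PORT B =====
-- _inv_mod's while-loop: while r: q = old_r // r; (old_r, r), (old_s, s) simultaneous updates
def pvEuclidLoop (oldr r olds s : Int) : Int × Int :=
  if hr : r = 0 then (oldr, olds)  -- hr used by decreasing_by
  else
    let q := PySem.Int.floordiv oldr r
    pvEuclidLoop r (oldr - q * r) s (olds - q * s)
termination_by r.natAbs
decreasing_by
  have h := PySem.Int.floordiv_mul_add_mod oldr r
  have h2 := pvModAbsLt oldr r hr
  omega

def pvInvMod (a m : Int) : Int :=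
  let r := pvEuclidLoop (PySem.Int.mod a m) m 1 0
  if r.1 ≠ 1 then 0  -- Python: raise ValueError (excluded by Pre_)
  else r.2

def lagrange_For_ElGamal_alt (xPoints : List Int) (index : Int) (threshold : Int) (fieldsize : Int) : Int :=
  let terms := (PySem.List.pyRange 0 threshold 1).filter (fun i => i != index)
  if terms.isEmpty then 1
  else
    let num := terms.foldl (fun n i => n * PySem.List.pyGetD xPoints i 0) 1
    let den := terms.foldl (fun d i => d * (PySem.List.pyGetD xPoints i 0 - PySem.List.pyGetD xPoints index 0)) 1
    PySem.Int.mod (num * pvInvMod den fieldsize) fieldsize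

-- ===== PRECONDITION & SPEC =====
-- Pre_ is exactly the set of inputs on which Python A returns normally: either the loop body
-- never executes (A returns 1), or fieldsize ≥ 1, xPoints[index] exists, and every used
-- xPoints[i] exists with xPoints[i] - xPoints[index] coprime to fieldsize; on every other
-- input A raises (ValueError / IndexError / ZeroDivisionError).
def Pre_lagrange_For_ElGamal (xPoints : List Int) (index : Int) (threshold : Int) (fieldsize : Int) : Prop :=
  (threshold ≤ 0 ∨ (threshold = 1 ∧ index = 0)) ∨
  (1 ≤ fieldsize ∧ (PySem.List.pyGet? xPoints index).isSome = true ∧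
    ∀ i ∈ PySem.List.pyRange 0 threshold 1, i ≠ index →
      (PySem.List.pyGet? xPoints i).isSome = true ∧
      Int.gcd (PySem.List.pyGetD xPoints i 0 - PySem.List.pyGetD xPoints index 0) fieldsize = 1)
instance (xPoints : List Int) (index : Int) (threshold : Int) (fieldsize : Int) : Decidable (Pre_lagrange_For_ElGamal xPoints index threshold fieldsize) := by unfold Pre_lagrange_For_ElGamal; infer_instance

def pvWitness_lagrange_For_ElGamal : List Int × Int × Int × Int := ([1, 2, 3], 0, 3, 7)

def Spec_lagrange_For_ElGamal (xPoints : List Int) (index : Int) (threshold : Int) (fieldsize : Int) (out : Int) : Prop := out = lagrange_For_ElGamal_alt xPoints index threshold fieldsize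
instance (xPoints : List Int) (index : Int) (threshold : Int) (fieldsize : Int) (out : Int) : Decidable (Spec_lagrange_For_ElGamal xPoints index threshold fieldsize out) := by unfold Spec_lagrange_For_ElGamal; infer_instance

-- ===== CLAIM (what is proved, stated in full; the proofs are below) =====
def Claim_equal_lagrange_For_ElGamal : Prop := ∀ (xPoints : List Int) (index : Int) (threshold : Int) (fieldsize : Int), Dom_lagrange_For_ElGamal xPoints index threshold fieldsize → Pre_lagrange_For_ElGamal xPoints index threshold fieldsize → Spec_lagrange_For_ElGamal xPoints index threshold fieldsize (lagrange_For_ElGamal xPoints index threshold fieldsize)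

-- ===== LEMMAS AND PROOFS =====

theorem pv_gcd_shift (r x q : Int) : Int.gcd r (x - q * r) = Int.gcd x r := by
  have h : x - q * r = x + r * (-q) := by ring
  rw [h, Int.gcd_add_mul_left_right, Int.gcd_comm]

theorem pv_gcd_mod (a b : Int) : Int.gcd b (PySem.Int.mod a b) = Int.gcd a b := by
  have h := PySem.Int.floordiv_mul_add_mod a b
  have h2 : PySem.Int.mod a b = a - PySem.Int.floordiv a b * b := by omega
  rw [h2, pv_gcd_shift]

-- correctness of A's recursive extended Euclid on the calls Pre_ admits
theorem pvEgcd_spec (n : Nat) : ∀ (a b : Int), b.natAbs = n → 0 ≤ b → (0 ≤ a ∨ 0 < b) →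
    (pvEgcd a b).1 = Int.gcd a b ∧
    a * (pvEgcd a b).2.1 + b * (pvEgcd a b).2.2 = Int.gcd a b := by
  induction n using Nat.strong_induction_on with
  | _ n ih =>
    intro a b hn hb hab
    rw [pvEgcd]
    by_cases hb0 : b = 0
    · subst hb0
      rcases hab with ha | h0
      · simp [Int.gcd, Int.natAbs_of_nonneg ha]
      · omega
    · have hbpos : 0 < b := lt_of_le_of_ne hb (Ne.symm hb0)
      rw [if_neg (by omega), dif_neg hb0]
      set m := PySem.Int.mod a b with hm
      have hm0 : 0 ≤ m := PySem.Int.mod_nonneg a hbpos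
      have hmlt : m < b := PySem.Int.mod_lt a hbpos
      obtain ⟨h1, h2⟩ := ih m.natAbs (by omega) b m rfl hm0 (Or.inl hb)
      have hgcd : Int.gcd b m = Int.gcd a b := pv_gcd_mod a b
      refine ⟨by simpa [hgcd] using h1, ?_⟩
      have hq := PySem.Int.floordiv_mul_add_mod a b
      rw [← hm] at hq
      rw [hgcd] at h2
      simp only []
      linear_combination h2 - (pvEgcd b m).2.2 * hq

-- correctness of B's iterative extended Euclid (Bezout tracked modulo m against a0)
theorem pvEuclidLoop_spec (n : Nat) : ∀ (oldr r olds s a0 m : Int), r.natAbs = n →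
    0 ≤ r → 0 ≤ oldr →
    olds * a0 ≡ oldr [ZMOD m] → s * a0 ≡ r [ZMOD m] →
    (pvEuclidLoop oldr r olds s).1 = Int.gcd oldr r ∧
    (pvEuclidLoop oldr r olds s).2 * a0 ≡ Int.gcd oldr r [ZMOD m] := by
  induction n using Nat.strong_induction_on with
  | _ n ih =>
    intro oldr r olds s a0 m hn hr0 holdr hc1 hc2
    rw [pvEuclidLoop]
    by_cases hr : r = 0
    · subst hr
      rw [dif_pos rfl]
      have hg0 : (Int.gcd oldr 0 : Int) = oldr := by
        rw [Int.gcd_zero_right, Int.natAbs_of_nonneg holdr]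
      refine ⟨hg0.symm, ?_⟩
      rw [hg0]
      exact hc1
    · have hrpos : 0 < r := lt_of_le_of_ne hr0 (Ne.symm hr)
      rw [dif_neg hr]
      set q := PySem.Int.floordiv oldr r with hqdef
      have hq := PySem.Int.floordiv_mul_add_mod oldr r
      rw [← hqdef] at hq
      have hmod0 := PySem.Int.mod_nonneg oldr hrpos
      have hmodlt := PySem.Int.mod_lt oldr hrpos
      have hr' : oldr - q * r = PySem.Int.mod oldr r := by omega
      have hc2' : (olds - q * s) * a0 ≡ oldr - q * r [ZMOD m] := by
        have : (olds - q * s) * a0 = olds * a0 - q * (s * a0) := by ring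
        rw [this]
        exact hc1.sub (hc2.mul_left q)
      obtain ⟨h1, h2⟩ := ih (oldr - q * r).natAbs (by omega) r (oldr - q * r) s (olds - q * s) a0 m rfl (by omega) hr0 hc2 hc2'
      have hgcd : Int.gcd r (oldr - q * r) = Int.gcd oldr r := pv_gcd_shift r oldr q
      exact ⟨by rw [h1, hgcd], by rw [hgcd] at h2; exact h2⟩

theorem pvInvMod_spec (den f : Int) (hf : 1 ≤ f) (hg : Int.gcd den f = 1) :
    pvInvMod den f * den ≡ 1 [ZMOD f] := by
  have hfpos : (0:Int) < f := by omega
  set a0 := PySem.Int.mod den f with ha0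
  have ha0nn : 0 ≤ a0 := PySem.Int.mod_nonneg den hfpos
  have ha0den : a0 ≡ den [ZMOD f] := by
    rw [ha0, PySem.Int.mod_eq_emod_of_pos hfpos]
    exact Int.mod_modEq den f
  have hga0 : Int.gcd a0 f = 1 := by
    rw [Int.gcd_comm, ha0, pv_gcd_mod den f, hg]
  have hc1 : (1:Int) * a0 ≡ a0 [ZMOD f] := by rw [one_mul]
  have hc2 : (0:Int) * a0 ≡ f [ZMOD f] := by
    rw [zero_mul]
    exact (Int.modEq_zero_iff_dvd.mpr dvd_rfl).symm
  obtain ⟨h1, h2⟩ := pvEuclidLoop_spec f.natAbs a0 f 1 0 a0 f rfl (by omega) ha0nn hc1 hc2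
  rw [hga0] at h1 h2
  push_cast at h1 h2
  rw [pvInvMod]
  simp only [← ha0, h1, ne_eq, not_true_eq_false, if_false]
  calc (pvEuclidLoop a0 f 1 0).2 * den
      ≡ (pvEuclidLoop a0 f 1 0).2 * a0 [ZMOD f] := (ha0den.symm).mul_left _
    _ ≡ 1 [ZMOD f] := h2

-- every foldl-product is the product of the mapped list
theorem pv_foldl_mul (h : Int → Int) : ∀ (l : List Int) (a : Int),
    l.foldl (fun x i => x * h i) a = a * (l.map h).prod := by
  intro l
  induction l with
  | nil => simp
  | cons i l' ih => intro a; simp [ih, mul_assoc]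

theorem pv_gcd_prod (f : Int) : ∀ (l : List Int), (∀ x ∈ l, Int.gcd x f = 1) →
    Int.gcd l.prod f = 1 := by
  intro l
  induction l with
  | nil => simp
  | cons x l' ih =>
    intro h
    rw [List.prod_cons, ← Int.isCoprime_iff_gcd_eq_one]
    exact IsCoprime.mul_left
      (Int.isCoprime_iff_gcd_eq_one.mpr (h x (by simp)))
      (Int.isCoprime_iff_gcd_eq_one.mpr (ih (fun y hy => h y (by simp [hy]))))

-- one Lagrange factor of A: pvDivMod inverts its denominator modulo f
theorem pvDivMod_step (g d f : Int) (hf : 1 ≤ f) (hg : Int.gcd d f = 1) :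
    pvDivMod g d f * d ≡ g [ZMOD f] := by
  obtain ⟨h1, h2⟩ := pvEgcd_spec f.natAbs d f rfl (by omega) (Or.inr (by omega))
  rw [hg] at h1 h2
  push_cast at h1 h2
  rw [pvDivMod]
  simp only [h1, ne_eq, not_true_eq_false, if_false]
  have hdx : d * (pvEgcd d f).2.1 ≡ 1 [ZMOD f] := by
    have hdvd : f ∣ 1 - d * (pvEgcd d f).2.1 := ⟨(pvEgcd d f).2.2, by linarith⟩
    exact Int.modEq_iff_dvd.mpr hdvd
  calc g * (pvEgcd d f).2.1 * d = g * (d * (pvEgcd d f).2.1) := by ring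
    _ ≡ g * 1 [ZMOD f] := hdx.mul_left g
    _ = g := by ring

-- A's loop invariant: partial result times remaining denominators ≡ r0 times numerators
theorem pvA_inv (xs : List Int) (idx f : Int) (hf : 1 ≤ f) : ∀ (l : List Int) (r0 : Int),
    (∀ i ∈ l, Int.gcd (PySem.List.pyGetD xs i 0 - PySem.List.pyGetD xs idx 0) f = 1) →
    (l.foldl (fun r i => PySem.Int.mod (r * pvDivMod (PySem.List.pyGetD xs i 0)
        (PySem.List.pyGetD xs i 0 - PySem.List.pyGetD xs idx 0) f) f) r0)
      * (l.map (fun i => PySem.List.pyGetD xs i 0 - PySem.List.pyGetD xs idx 0)).prod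
    ≡ r0 * (l.map (fun i => PySem.List.pyGetD xs i 0)).prod [ZMOD f] := by
  intro l
  induction l with
  | nil => intro r0 _; simp
  | cons i l' ih =>
    intro r0 h
    have hgi := h i (by simp)
    set gi := PySem.List.pyGetD xs i 0
    set di := gi - PySem.List.pyGetD xs idx 0
    set dm := pvDivMod gi di f with hdm
    set r1 := PySem.Int.mod (r0 * dm) f with hr1
    have hr1m : r1 ≡ r0 * dm [ZMOD f] := by
      rw [hr1, PySem.Int.mod_eq_emod_of_pos (by omega)]
      exact Int.mod_modEq _ f
    have hIH := ih r1 (fun j hj => h j (by simp [hj]))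
    have hstep : dm * di ≡ gi [ZMOD f] := pvDivMod_step gi di f hf hgi
    simp only [List.foldl_cons, List.map_cons, List.prod_cons]
    calc (l'.foldl _ r1) * (di * (l'.map _).prod)
        = ((l'.foldl _ r1) * (l'.map _).prod) * di := by ring
      _ ≡ (r1 * (l'.map _).prod) * di [ZMOD f] := hIH.mul_right di
      _ ≡ ((r0 * dm) * (l'.map _).prod) * di [ZMOD f] := (hr1m.mul_right _).mul_right di
      _ = (r0 * (l'.map _).prod) * (dm * di) := by ring
      _ ≡ (r0 * (l'.map _).prod) * gi [ZMOD f] := hstep.mul_left _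
      _ = r0 * (gi * (l'.map _).prod) := by ring

-- A's loop result is reduced: in [0, f) as soon as the loop ran at least once
theorem pvA_bound (xs : List Int) (idx f : Int) (hf : 1 ≤ f) : ∀ (l : List Int) (r0 : Int),
    l ≠ [] →
    0 ≤ (l.foldl (fun r i => PySem.Int.mod (r * pvDivMod (PySem.List.pyGetD xs i 0)
        (PySem.List.pyGetD xs i 0 - PySem.List.pyGetD xs idx 0) f) f) r0) ∧
    (l.foldl (fun r i => PySem.Int.mod (r * pvDivMod (PySem.List.pyGetD xs i 0)
        (PySem.List.pyGetD xs i 0 - PySem.List.pyGetD xs idx 0) f) f) r0) < f := by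
  intro l
  induction l with
  | nil => intro _ h; exact absurd rfl h
  | cons i l' ih =>
    intro r0 _
    rcases List.eq_nil_or_concat l' with h | _
    · subst h
      simp only [List.foldl_cons, List.foldl_nil]
      exact ⟨PySem.Int.mod_nonneg _ (by omega), PySem.Int.mod_lt _ (by omega)⟩
    · rw [List.foldl_cons]
      exact ih _ (by rename_i h'; obtain ⟨l'', a, rfl⟩ := h'; simp)

theorem pv_unique (f den nm r1 r2 : Int) (hg : Int.gcd den f = 1)
    (h1 : 0 ≤ r1) (h1' : r1 < f) (h2 : 0 ≤ r2) (h2' : r2 < f)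
    (e1 : r1 * den ≡ nm [ZMOD f]) (e2 : r2 * den ≡ nm [ZMOD f]) : r1 = r2 := by
  have h := e1.trans e2.symm
  have hd : f ∣ r2 * den - r1 * den := Int.ModEq.dvd h
  have hd2 : f ∣ (r2 - r1) * den := by
    have he : (r2 - r1) * den = r2 * den - r1 * den := by ring
    rwa [he]
  have hcop : IsCoprime f den :=
    Int.isCoprime_iff_gcd_eq_one.mpr (by rw [Int.gcd_comm]; exact hg)
  have hdvd : f ∣ r2 - r1 := hcop.dvd_of_dvd_mul_right hd2
  obtain ⟨k, hk⟩ := hdvd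
  have hk0 : k = 0 := by nlinarith
  rw [hk0, mul_zero] at hk
  omega

-- ===== VERDICT (by name: the statement is the Claim_ definition above) =====
theorem lagrange_For_ElGamal_spec : Claim_equal_lagrange_For_ElGamal := by
  intro xs idx t f _ hpre
  unfold Spec_lagrange_For_ElGamal
  set L := PySem.List.pyRange 0 t 1 with hL
  set terms := L.filter (fun i => i != idx) with hterms
  have hA : lagrange_For_ElGamal xs idx t f =
      terms.foldl (fun r i => PySem.Int.mod (r * pvDivMod (PySem.List.pyGetD xs i 0)
        (PySem.List.pyGetD xs i 0 - PySem.List.pyGetD xs idx 0) f) f) 1 := by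
    unfold lagrange_For_ElGamal
    rw [hterms, List.foldl_filter]
    congr 1
    funext r i
    by_cases h : i = idx <;> simp [h]
  by_cases hE : terms = []
  · rw [hA, hE]
    unfold lagrange_For_ElGamal_alt
    rw [← hL, ← hterms, hE]
    simp
  · -- the loop ran: Pre_'s left disjunct is impossible, extract the right one
    have hright : 1 ≤ f ∧ (PySem.List.pyGet? xs idx).isSome = true ∧
        ∀ i ∈ L, i ≠ idx →
          (PySem.List.pyGet? xs i).isSome = true ∧
          Int.gcd (PySem.List.pyGetD xs i 0 - PySem.List.pyGetD xs idx 0) f = 1 := by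
      rcases hpre with hleft | hr
      · exfalso
        apply hE
        rcases hleft with ht | ⟨ht, hidx⟩
        · rw [hterms, hL, PySem.List.pyRange_one_eq_nil (by omega)]
          rfl
        · subst ht; subst hidx
          rw [hterms, hL]
          decide
      · exact hr
    obtain ⟨hf, _, hall⟩ := hright
    have hmem : ∀ i ∈ terms, Int.gcd (PySem.List.pyGetD xs i 0 - PySem.List.pyGetD xs idx 0) f = 1 := by
      intro i hi
      rw [hterms, List.mem_filter] at hi
      exact (hall i hi.1 (by simpa using hi.2)).2
    set num := (terms.map (fun i => PySem.List.pyGetD xs i 0)).prod with hnum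
    set den := (terms.map (fun i => PySem.List.pyGetD xs i 0 - PySem.List.pyGetD xs idx 0)).prod with hden
    have hgden : Int.gcd den f = 1 := by
      rw [hden]
      apply pv_gcd_prod
      intro x hx
      rw [List.mem_map] at hx
      obtain ⟨i, hi, rfl⟩ := hx
      exact hmem i hi
    have hB : lagrange_For_ElGamal_alt xs idx t f = PySem.Int.mod (num * pvInvMod den f) f := by
      unfold lagrange_For_ElGamal_alt
      rw [← hL, ← hterms]
      rw [if_neg (by simpa [List.isEmpty_iff] using hE)]
      rw [pv_foldl_mul, pv_foldl_mul, one_mul, one_mul, ← hnum, ← hden]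
    -- both sides are in [0, f) and multiply with den to num modulo f
    set rA := terms.foldl (fun r i => PySem.Int.mod (r * pvDivMod (PySem.List.pyGetD xs i 0)
        (PySem.List.pyGetD xs i 0 - PySem.List.pyGetD xs idx 0) f) f) 1 with hrA
    have hAinv : rA * den ≡ num [ZMOD f] := by
      have := pvA_inv xs idx f hf terms 1 hmem
      simpa [← hnum, ← hden] using this
    have hAb := pvA_bound xs idx f hf terms 1 hE
    set rB := PySem.Int.mod (num * pvInvMod den f) f with hrB
    have hBb : 0 ≤ rB ∧ rB < f :=
      ⟨PySem.Int.mod_nonneg _ (by omega), PySem.Int.mod_lt _ (by omega)⟩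
    have hBinv : rB * den ≡ num [ZMOD f] := by
      have h1 : rB ≡ num * pvInvMod den f [ZMOD f] := by
        rw [hrB, PySem.Int.mod_eq_emod_of_pos (by omega)]
        exact Int.mod_modEq _ f
      have h2 : pvInvMod den f * den ≡ 1 [ZMOD f] := pvInvMod_spec den f hf hgden
      calc rB * den ≡ (num * pvInvMod den f) * den [ZMOD f] := h1.mul_right den
        _ = num * (pvInvMod den f * den) := by ring
        _ ≡ num * 1 [ZMOD f] := h2.mul_left num
        _ = num := by ring
    rw [hA, hB]
    exact pv_unique f den num rA rB hgden hAb.1 hAb.2 hBb.1 hBb.2 hAinv hBinv
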